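-- pv_equiv track=rewrite | github.com/svend4/meta | projects/hexglyph/solan_ca.py | find_orbit
-- ===== SOURCE A (Python) =====
-- def _hamming_weight(h: int) -> int:
--     return bin(h).count('1')
--
-- def step(cells: list[int], rule: str = 'xor') -> list[int]:
--     """Один шаг CA: вернуть новый список состояний.
--
--     Граничные условия: тороидальные (периодические).
--     """
--     n = len(cells)
--     if rule == 'xor':
--         return [cells[(i - 1) % n] ^ cells[(i + 1) % n] for i in range(n)]
--     if rule == 'xor3':
--         return [cells[(i - 1) % n] ^ cells[i] ^ cells[(i + 1) % n]
--                 for i in range(n)]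
--     if rule == 'and':
--         return [cells[(i - 1) % n] & cells[(i + 1) % n] for i in range(n)]
--     if rule == 'or':
--         return [cells[(i - 1) % n] | cells[(i + 1) % n] for i in range(n)]
--     if rule == 'hamming':
--         # next[i] = сосед с бо́льшим Хэмминг-весом
--         nxt = []
--         for i in range(n):
--             left  = cells[(i - 1) % n]
--             right = cells[(i + 1) % n]
--             nxt.append(left if _hamming_weight(left) >= _hamming_weight(right)
--                         else right)
--         return nxt
--     raise ValueError(f"Неизвестное правило: {rule!r}")
--
-- def find_orbit(
--     cells: list[int],
--     rule:  str = 'xor',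
--     max_steps: int = 5000,
-- ) -> tuple[int | None, int | None]:
--     """Найти транзиент и период орбиты для данного начального состояния.
--
--     Возвращает ``(transient, period)`` или ``(None, None)``,
--     если цикл не обнаружен за ``max_steps`` шагов.
--
--     Алгоритм: наивный hash-map — O(max_steps · width) по времени и памяти.
--     Для линейных правил (xor, xor3) период не превышает 2^width − 1,
--     поэтому max_steps=5000 достаточен для width ≤ 12.
--     """
--     seen: dict[tuple[int, ...], int] = {}
--     cur = list(cells)
--     for t in range(max_steps + 1):
--         key = tuple(cur)
--         if key in seen:
--             return seen[key], t - seen[key]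
--         seen[key] = t
--         cur = step(cur, rule)
--     return None, None
-- ===== SOURCE B (Python) =====
-- def _popcount(x: int) -> int:
--     return bin(x).count('1')
--
-- def _step(cells: list[int], rule: str) -> list[int]:
--     """One CA step via whole-list rotations instead of per-index modular
--     arithmetic: left[i] = cells[(i-1) % n], right[i] = cells[(i+1) % n]."""
--     left = cells[-1:] + cells[:-1]
--     right = cells[1:] + cells[:1]
--     if rule == 'xor':
--         return [l ^ r for l, r in zip(left, right)]
--     if rule == 'xor3':
--         return [l ^ c ^ r for l, c, r in zip(left, cells, right)]
--     if rule == 'and':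
--         return [l & r for l, r in zip(left, right)]
--     if rule == 'or':
--         return [l | r for l, r in zip(left, right)]
--     if rule == 'hamming':
--         return [l if _popcount(l) >= _popcount(r) else r
--                 for l, r in zip(left, right)]
--     raise ValueError(f"unknown rule: {rule!r}")
--
-- def find_orbit(
--     cells: list[int],
--     rule:  str = 'xor',
--     max_steps: int = 5000,
-- ) -> tuple[int | None, int | None]:
--     """Floyd's tortoise-and-hare: O(1) memory instead of a seen-state hashmap.
--
--     Returns (transient, period), or (None, None) when transient + period
--     exceeds max_steps.
--     """
--     if max_steps < 1:
--         return None, None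
--     x0 = list(cells)
--     slow = _step(x0, rule)
--     fast = _step(slow, rule)
--     m = 1
--     while slow != fast:
--         if m >= max_steps:
--             return None, None
--         slow = _step(slow, rule)
--         fast = _step(_step(fast, rule), rule)
--         m += 1
--     mu = 0
--     tort = x0
--     while tort != slow:
--         tort = _step(tort, rule)
--         slow = _step(slow, rule)
--         mu += 1
--     lam = 1
--     probe = _step(tort, rule)
--     while probe != tort:
--         probe = _step(probe, rule)
--         lam += 1
--     if mu + lam <= max_steps:
--         return mu, lam
--     return None, None
-- ===== Notes on version B (the rewrite author's own statement) =====
-- stated objective: alternative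
-- what changed: Replaced the seen-state hashmap orbit scan by Floyd's tortoise-and-hare cycle detection (meeting point, then transient mu, then period lam, returned only when mu+lam <= max_steps) with the CA step computed by whole-list rotations and zip instead of per-index modular arithmetic, using O(1) memory instead of O(max_steps) stored states.
import Mathlib
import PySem

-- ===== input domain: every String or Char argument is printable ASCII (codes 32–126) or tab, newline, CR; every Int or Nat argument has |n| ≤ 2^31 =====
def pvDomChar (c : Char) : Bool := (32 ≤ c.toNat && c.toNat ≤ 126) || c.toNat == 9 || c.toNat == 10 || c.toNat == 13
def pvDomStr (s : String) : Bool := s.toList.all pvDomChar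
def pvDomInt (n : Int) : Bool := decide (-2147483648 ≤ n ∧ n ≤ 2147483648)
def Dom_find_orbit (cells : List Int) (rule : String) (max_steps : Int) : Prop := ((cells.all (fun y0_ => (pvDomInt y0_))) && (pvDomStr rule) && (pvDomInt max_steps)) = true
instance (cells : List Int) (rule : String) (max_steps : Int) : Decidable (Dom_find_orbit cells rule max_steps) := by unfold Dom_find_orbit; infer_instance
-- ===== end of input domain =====

-- B replaces A's seen-state hashmap by Floyd's tortoise-and-hare cycle detection (O(1) memory
-- instead of O(max_steps) stored states; same asymptotic time), with the CA step computed by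
-- whole-list rotations + zip instead of per-index modular arithmetic. Equivalence of return
-- values is proved on Pre_ (valid rule, or a negative max_steps on which A never calls step).

-- ===== PORT A =====
-- bin(h).count('1'): PySem.Int.bitCount is Python-exact (reads |h|, as bin() prints '-0b…')
def hamming_weight (h : Int) : Int := (PySem.Int.bitCount h : Int)

-- step(cells, rule).  pyGetD's default 0 is never used: (i±1) % n ∈ [0, n) when the range is
-- non-empty (n > 0).  Python's ValueError branch (unknown rule) is ported as [] — those calls
-- only happen outside Pre_find_orbit.
def step_ca (cells : List Int) (rule : String) : List Int :=
  let n : Int := PySem.List.len cells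
  if rule = "xor" then
    (PySem.List.pyRange 0 n 1).map (fun i =>
      PySem.Int.bxor (PySem.List.pyGetD cells (PySem.Int.mod (i - 1) n) 0)
                     (PySem.List.pyGetD cells (PySem.Int.mod (i + 1) n) 0))
  else if rule = "xor3" then
    (PySem.List.pyRange 0 n 1).map (fun i =>
      PySem.Int.bxor (PySem.Int.bxor (PySem.List.pyGetD cells (PySem.Int.mod (i - 1) n) 0)
                                     (PySem.List.pyGetD cells i 0))
                     (PySem.List.pyGetD cells (PySem.Int.mod (i + 1) n) 0))
  else if rule = "and" then
    (PySem.List.pyRange 0 n 1).map (fun i =>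
      PySem.Int.band (PySem.List.pyGetD cells (PySem.Int.mod (i - 1) n) 0)
                     (PySem.List.pyGetD cells (PySem.Int.mod (i + 1) n) 0))
  else if rule = "or" then
    (PySem.List.pyRange 0 n 1).map (fun i =>
      PySem.Int.bor (PySem.List.pyGetD cells (PySem.Int.mod (i - 1) n) 0)
                    (PySem.List.pyGetD cells (PySem.Int.mod (i + 1) n) 0))
  else if rule = "hamming" then
    (PySem.List.pyRange 0 n 1).foldl (fun nxt i =>
      let left  := PySem.List.pyGetD cells (PySem.Int.mod (i - 1) n) 0
      let right := PySem.List.pyGetD cells (PySem.Int.mod (i + 1) n) 0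
      nxt ++ [if hamming_weight right ≤ hamming_weight left then left else right]) []
  else []

-- the 'for t in range(max_steps + 1)' loop with early return; fuel = the exact trip count
def orbit_loop (rule : String) : Nat → PySem.Dict (List Int) Int → List Int → Int →
    Option Int × Option Int
  | 0, _, _, _ => (none, none)
  | fuel + 1, seen, cur, t =>
    match seen.get? cur with
    | some s => (some s, some (t - s))
    | none => orbit_loop rule fuel (seen.insert cur t) (step_ca cur rule) (t + 1)

def find_orbit (cells : List Int) (rule : String) (max_steps : Int) : Option Int × Option Int :=
  orbit_loop rule (max_steps + 1).toNat PySem.Dict.empty cells 0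

-- ===== PORT B =====
-- _popcount
def popcount (h : Int) : Int := (PySem.Int.bitCount h : Int)

-- cells[-1:] + cells[:-1]: left neighbour of i is at index i in this rotation
def rotr (xs : List Int) : List Int :=
  PySem.List.slice xs (some (-1)) none ++ PySem.List.slice xs none (some (-1))

-- cells[1:] + cells[:1]: right neighbour of i is at index i in this rotation
def rotl (xs : List Int) : List Int :=
  PySem.List.slice xs (some 1) none ++ PySem.List.slice xs none (some 1)

-- _step(cells, rule): zip over the two rotations (unknown rule raises only outside Pre_; ported as [])
def step_rot (cells : List Int) (rule : String) : List Int :=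
  if rule = "xor" then
    ((rotr cells).zip (rotl cells)).map (fun p => PySem.Int.bxor p.1 p.2)
  else if rule = "xor3" then
    ((rotr cells).zip (cells.zip (rotl cells))).map
      (fun p => PySem.Int.bxor (PySem.Int.bxor p.1 p.2.1) p.2.2)
  else if rule = "and" then
    ((rotr cells).zip (rotl cells)).map (fun p => PySem.Int.band p.1 p.2)
  else if rule = "or" then
    ((rotr cells).zip (rotl cells)).map (fun p => PySem.Int.bor p.1 p.2)
  else if rule = "hamming" then
    ((rotr cells).zip (rotl cells)).map
      (fun p => if popcount p.2 ≤ popcount p.1 then p.1 else p.2)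
  else []

-- Phase 1 'while slow != fast' with the 'if m >= max_steps: return None, None' cutoff.
-- fuel only makes the while-loop structural: the cutoff exits before m exceeds max_steps,
-- so fuel = max_steps.toNat is never exhausted (proved in the lemmas below).
def floyd_meet (rule : String) (max_steps : Int) : Nat → List Int → List Int → Int →
    Option (List Int × Int)
  | 0, _, _, _ => none
  | fuel + 1, slow, fast, m =>
    if slow = fast then some (slow, m)
    else if max_steps ≤ m then none
    else floyd_meet rule max_steps fuel (step_rot slow rule)
      (step_rot (step_rot fast rule) rule) (m + 1)

-- Phase 2 'while tort != slow' (fuel never exhausted under Pre_: mu ≤ max_steps)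
def floyd_walk (rule : String) : Nat → List Int → List Int → Int → Option (List Int × Int)
  | 0, _, _, _ => none
  | fuel + 1, tort, slow, mu =>
    if tort = slow then some (tort, mu)
    else floyd_walk rule fuel (step_rot tort rule) (step_rot slow rule) (mu + 1)

-- Phase 3 'while probe != tort' (fuel never exhausted under Pre_: lam ≤ max_steps)
def floyd_cycle (rule : String) : Nat → List Int → List Int → Int → Option Int
  | 0, _, _, _ => none
  | fuel + 1, probe, tort, lam =>
    if probe = tort then some lam
    else floyd_cycle rule fuel (step_rot probe rule) tort (lam + 1)

def find_orbit_alt (cells : List Int) (rule : String) (max_steps : Int) :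
    Option Int × Option Int :=
  if max_steps < 1 then (none, none)
  else
    let slow := step_rot cells rule
    let fast := step_rot slow rule
    match floyd_meet rule max_steps max_steps.toNat slow fast 1 with
    | none => (none, none)
    | some (slowm, _) =>
      match floyd_walk rule (max_steps.toNat + 1) cells slowm 0 with
      | none => (none, none)
      | some (tort, mu) =>
        match floyd_cycle rule max_steps.toNat (step_rot tort rule) tort 1 with
        | none => (none, none)
        | some lam => if mu + lam ≤ max_steps then (some mu, some lam) else (none, none)

-- ===== PRECONDITION & SPEC =====
-- Pre_ excludes exactly the inputs where A raises ValueError: an unknown rule reached by step(),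
-- i.e. an unknown rule together with max_steps ≥ 0 (for max_steps < 0 the loop body never runs
-- and A returns (None, None) for any rule, so those inputs stay inside Pre_).
def Pre_find_orbit (cells : List Int) (rule : String) (max_steps : Int) : Prop :=
  rule = "xor" ∨ rule = "xor3" ∨ rule = "and" ∨ rule = "or" ∨ rule = "hamming" ∨ max_steps < 0
instance (cells : List Int) (rule : String) (max_steps : Int) :
    Decidable (Pre_find_orbit cells rule max_steps) := by unfold Pre_find_orbit; infer_instance

def pvWitness_find_orbit : List Int × String × Int := ([1, 0, 0, 1], "xor", 20)

def Spec_find_orbit (cells : List Int) (rule : String) (max_steps : Int)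
    (out : Option Int × Option Int) : Prop := out = find_orbit_alt cells rule max_steps
instance (cells : List Int) (rule : String) (max_steps : Int) (out : Option Int × Option Int) :
    Decidable (Spec_find_orbit cells rule max_steps out) := by unfold Spec_find_orbit; infer_instance

-- ===== CLAIM (what is proved, stated in full; the proofs are below) =====
def Claim_equal_find_orbit : Prop := ∀ (cells : List Int) (rule : String) (max_steps : Int),
  Dom_find_orbit cells rule max_steps → Pre_find_orbit cells rule max_steps →
  Spec_find_orbit cells rule max_steps (find_orbit cells rule max_steps)

-- ===== LEMMAS AND PROOFS =====

-- B's rotations written as A's index maps: rotr xs is a cyclic right-shift …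
theorem rotr_eq (xs : List Int) :
    rotr xs = (PySem.List.pyRange 0 (PySem.List.len xs) 1).map
      (fun i => PySem.List.pyGetD xs (PySem.Int.mod (i - 1) (PySem.List.len xs)) 0) := by
  have hlen : PySem.List.len xs = (xs.length : Int) := by simp [PySem.List.len_eq]
  have hrot : rotr xs = xs.rotate (xs.length - 1) := by
    rw [rotr, PySem.List.slice_from_neg_one, PySem.List.slice_to_neg_one,
      List.dropLast_eq_take, List.rotate_eq_drop_append_take (by omega)]
  rw [hrot, hlen, PySem.List.pyRange_zero_natCast, List.map_map]
  apply List.ext_getElem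
  · simp
  · intro k h1 h2
    have hk : k < xs.length := by simpa using h2
    have hn : 0 < xs.length := by omega
    rw [List.getElem_rotate, List.getElem_map, List.getElem_range]
    simp only [Function.comp]
    have hmod : PySem.Int.mod ((k : Int) - 1) (xs.length : Int)
        = (((k + (xs.length - 1)) % xs.length : Nat) : Int) := by
      rw [PySem.Int.mod_eq_emod_of_pos (by exact_mod_cast hn), Int.natCast_mod,
        show ((k + (xs.length - 1) : Nat) : Int) = ((k : Int) - 1) + (xs.length : Int) by omega,
        Int.add_emod_right]
    rw [hmod, PySem.List.pyGetD_eq_getElem _ _ (by positivity)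
      (by exact_mod_cast Nat.mod_lt _ hn)]
    congr 1

-- … and rotl xs a cyclic left-shift
theorem rotl_eq (xs : List Int) :
    rotl xs = (PySem.List.pyRange 0 (PySem.List.len xs) 1).map
      (fun i => PySem.List.pyGetD xs (PySem.Int.mod (i + 1) (PySem.List.len xs)) 0) := by
  rcases xs with _ | ⟨y, ys⟩
  · simp [rotl, PySem.List.slice, PySem.List.pyRange]
  set xs := y :: ys with hxs
  have hlen : PySem.List.len xs = (xs.length : Int) := by simp [PySem.List.len_eq]
  have hn : 0 < xs.length := by simp [hxs]
  have hrot : rotl xs = xs.rotate 1 := by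
    have h1 : PySem.List.slice xs none (some 1) = xs.take (1 : Int).toNat :=
      PySem.List.slice_to xs (by norm_num)
    rw [rotl, PySem.List.slice_from_one, h1,
      List.rotate_eq_drop_append_take (by omega), List.drop_one]
    rfl
  rw [hrot, hlen, PySem.List.pyRange_zero_natCast, List.map_map]
  apply List.ext_getElem
  · simp
  · intro k h1 h2
    have hk : k < xs.length := by simpa using h2
    rw [List.getElem_rotate, List.getElem_map, List.getElem_range]
    simp only [Function.comp]
    have hmod : PySem.Int.mod ((k : Int) + 1) (xs.length : Int)
        = (((k + 1) % xs.length : Nat) : Int) := by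
      rw [PySem.Int.mod_eq_emod_of_pos (by exact_mod_cast hn), Int.natCast_mod]
      norm_cast
    rw [hmod, PySem.List.pyGetD_eq_getElem _ _ (by positivity)
      (by exact_mod_cast Nat.mod_lt _ hn)]
    congr 1

-- B's rotation-and-zip step computes the same list as A's index-arithmetic step
@[simp] theorem step_rot_eq (cells : List Int) (rule : String) :
    step_rot cells rule = step_ca cells rule := by
  unfold step_rot step_ca
  have hc : cells = (PySem.List.pyRange 0 (PySem.List.len cells) 1).map
      (fun i => PySem.List.pyGetD cells i 0) :=
    (PySem.List.map_pyGetD_pyRange_zero cells 0).symm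
  split_ifs
  · rw [rotr_eq, rotl_eq]; simp only [List.zip_map', List.map_map]; rfl
  · rw [rotr_eq, rotl_eq]
    have hmid : cells.zip ((PySem.List.pyRange 0 (PySem.List.len cells) 1).map
          (fun i => PySem.List.pyGetD cells (PySem.Int.mod (i + 1) (PySem.List.len cells)) 0))
        = ((PySem.List.pyRange 0 (PySem.List.len cells) 1).map
            (fun i => PySem.List.pyGetD cells i 0)).zip
          ((PySem.List.pyRange 0 (PySem.List.len cells) 1).map
            (fun i => PySem.List.pyGetD cells (PySem.Int.mod (i + 1) (PySem.List.len cells)) 0)) := by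
      rw [← hc]
    rw [hmid]
    simp only [List.zip_map', List.map_map]; rfl
  · rw [rotr_eq, rotl_eq]; simp only [List.zip_map', List.map_map]; rfl
  · rw [rotr_eq, rotl_eq]; simp only [List.zip_map', List.map_map]; rfl
  · rw [rotr_eq, rotl_eq]
    simp only [List.zip_map', List.map_map, PySem.List.foldl_append_singleton_eq_map,
      List.nil_append]
    simp [popcount, hamming_weight, Function.comp]
  · rfl

-- the trajectory of the CA: traj t = step^t cells
def traj (cells : List Int) (rule : String) (t : Nat) : List Int :=
  (fun c => step_ca c rule)^[t] cells

-- the dict A's loop has built after t iterations without a repeat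
def seenUpto (cells : List Int) (rule : String) (t : Nat) : PySem.Dict (List Int) Int :=
  (List.range t).foldl (fun d i => d.insert (traj cells rule i) (i : Int)) PySem.Dict.empty

theorem traj_succ (cells : List Int) (rule : String) (t : Nat) :
    traj cells rule (t + 1) = step_ca (traj cells rule t) rule := by
  simp [traj, Function.iterate_succ_apply']

theorem traj_add (cells : List Int) (rule : String) (a b : Nat) :
    traj cells rule (a + b) = (fun c => step_ca c rule)^[b] (traj cells rule a) := by
  simp [traj, Nat.add_comm a b, Function.iterate_add_apply]

theorem seenUpto_succ (cells : List Int) (rule : String) (t : Nat) :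
    seenUpto cells rule (t + 1) = (seenUpto cells rule t).insert (traj cells rule t) (t : Int) := by
  simp [seenUpto, List.range_succ]

theorem seenUpto_get?_none (cells : List Int) (rule : String) (t : Nat) (c : List Int)
    (h : ∀ i, i < t → traj cells rule i ≠ c) :
    (seenUpto cells rule t).get? c = none := by
  induction t with
  | zero => simp [seenUpto]
  | succ t ih =>
    rw [seenUpto_succ, PySem.Dict.get?_insert]
    rw [if_neg (fun hc => h t (by omega) hc.symm)]
    exact ih (fun i hi => h i (by omega))

theorem seenUpto_get?_some (cells : List Int) (rule : String) (t i : Nat) (hi : i < t)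
    (hinj : ∀ a b : Nat, a < b → b < t → traj cells rule a ≠ traj cells rule b) :
    (seenUpto cells rule t).get? (traj cells rule i) = some (i : Int) := by
  induction t with
  | zero => omega
  | succ t ih =>
    rw [seenUpto_succ, PySem.Dict.get?_insert]
    by_cases hit : i = t
    · subst hit; simp
    · rw [if_neg (hinj i t (by omega) (by omega))]
      exact ih (by omega) (fun a b hab hbt => hinj a b hab (by omega))

-- ===== A-side loop characterisation =====

theorem orbit_loop_no_dup (cells : List Int) (rule : String) :
    ∀ (fuel t : Nat),
      (∀ a b : Nat, a < b → b < t + fuel → traj cells rule a ≠ traj cells rule b) →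
      orbit_loop rule fuel (seenUpto cells rule t) (traj cells rule t) (t : Int) = (none, none) := by
  intro fuel
  induction fuel with
  | zero => intro t _; rfl
  | succ fuel ih =>
    intro t hinj
    rw [orbit_loop, seenUpto_get?_none cells rule t _ (fun i hi => hinj i t hi (by omega))]
    rw [← seenUpto_succ, ← traj_succ]
    have : ((t : Int) + 1) = ((t + 1 : Nat) : Int) := by push_cast; ring
    rw [this]
    exact ih (t + 1) (fun a b hab hb => hinj a b hab (by omega))

theorem orbit_loop_dup (cells : List Int) (rule : String) (μ T₀ : Nat)
    (hμT : μ < T₀) (heq : traj cells rule μ = traj cells rule T₀)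
    (hinj : ∀ a b : Nat, a < b → b < T₀ → traj cells rule a ≠ traj cells rule b) :
    ∀ (fuel t : Nat), t ≤ T₀ → T₀ < t + fuel →
      orbit_loop rule fuel (seenUpto cells rule t) (traj cells rule t) (t : Int) =
        (some (μ : Int), some ((T₀ : Int) - (μ : Int))) := by
  intro fuel
  induction fuel with
  | zero => intro t h1 h2; omega
  | succ fuel ih =>
    intro t ht hfu
    by_cases htT : t = T₀
    · subst htT
      rw [orbit_loop, ← heq, seenUpto_get?_some cells rule t μ hμT hinj]
    · rw [orbit_loop, seenUpto_get?_none cells rule t _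
        (fun i hi => hinj i t hi (by omega))]
      rw [← seenUpto_succ, ← traj_succ]
      have : ((t : Int) + 1) = ((t + 1 : Nat) : Int) := by push_cast; ring
      rw [this]
      exact ih (t + 1) (by omega) (by omega)

-- ===== orbit structure: eventual periodicity from the first repeat =====

theorem traj_period (cells : List Int) (rule : String) (μ lam : Nat)
    (hper : traj cells rule (μ + lam) = traj cells rule μ) :
    ∀ t, μ ≤ t → traj cells rule (t + lam) = traj cells rule t := by
  intro t ht
  have h1 : t + lam = (μ + lam) + (t - μ) := by omega
  have h2 : μ + (t - μ) = t := by omega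
  rw [h1, traj_add, hper, ← traj_add, h2]

theorem traj_period_mul (cells : List Int) (rule : String) (μ lam : Nat)
    (hper : traj cells rule (μ + lam) = traj cells rule μ) :
    ∀ (k t : Nat), μ ≤ t → traj cells rule (t + k * lam) = traj cells rule t := by
  intro k
  induction k with
  | zero => intro t _; simp
  | succ k ih =>
    intro t ht
    have h1 : t + (k + 1) * lam = (t + k * lam) + lam := by ring
    rw [h1, traj_period cells rule μ lam hper (t + k * lam) (by omega), ih t ht]

theorem traj_reduce (cells : List Int) (rule : String) (μ lam : Nat) (hlam : 1 ≤ lam)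
    (hper : traj cells rule (μ + lam) = traj cells rule μ) :
    ∀ t, μ ≤ t → traj cells rule t = traj cells rule (μ + (t - μ) % lam) := by
  intro t
  induction t using Nat.strong_induction_on with
  | _ t ih =>
    intro ht
    by_cases hsmall : t < μ + lam
    · have : μ + (t - μ) % lam = t := by
        have : (t - μ) % lam = t - μ := Nat.mod_eq_of_lt (by omega)
        omega
      rw [this]
    · have hge : μ ≤ t - lam := by omega
      have hstep : traj cells rule t = traj cells rule (t - lam) := by
        have := traj_period cells rule μ lam hper (t - lam) hge
        rw [Nat.sub_add_cancel (by omega)] at this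
        exact this
      have hmod : (t - μ) % lam = (t - lam - μ) % lam := by
        have h : t - μ = (t - lam - μ) + lam := by omega
        rw [h, Nat.add_mod_right]
      rw [hstep, hmod]
      exact ih (t - lam) (by omega) hge

theorem traj_key (cells : List Int) (rule : String) (μ lam : Nat) (hlam : 1 ≤ lam)
    (hper : traj cells rule (μ + lam) = traj cells rule μ)
    (hinj : ∀ a b : Nat, a < b → b < μ + lam → traj cells rule a ≠ traj cells rule b) :
    ∀ a b : Nat, a < b → traj cells rule a = traj cells rule b → μ ≤ a ∧ lam ∣ (b - a) := by
  intro a b hab heqab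
  have ha : μ ≤ a := by
    by_contra hlt
    push_neg at hlt
    by_cases hb : b < μ + lam
    · exact hinj a b hab hb heqab
    · have hred := traj_reduce cells rule μ lam hlam hper b (by omega)
      have hmlt : (b - μ) % lam < lam := Nat.mod_lt _ (by omega)
      exact hinj a (μ + (b - μ) % lam) (by omega) (by omega) (heqab.trans hred)
  have hbμ : μ ≤ b := by omega
  refine ⟨ha, ?_⟩
  have hra := traj_reduce cells rule μ lam hlam hper a ha
  have hrb := traj_reduce cells rule μ lam hlam hper b hbμ
  have hmla : (a - μ) % lam < lam := Nat.mod_lt _ (by omega)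
  have hmlb : (b - μ) % lam < lam := Nat.mod_lt _ (by omega)
  have hreq : (a - μ) % lam = (b - μ) % lam := by
    by_contra hne
    have heqr : traj cells rule (μ + (a - μ) % lam) = traj cells rule (μ + (b - μ) % lam) :=
      hra.symm.trans (heqab.trans hrb)
    rcases Nat.lt_or_ge ((a - μ) % lam) ((b - μ) % lam) with h | h
    · exact hinj _ _ (by omega) (by omega) heqr
    · exact hinj _ _ (by omega) (by omega) heqr.symm
  have hdvd : lam ∣ (b - μ) - (a - μ) :=
    (Nat.modEq_iff_dvd' (by omega)).mp hreq
  have : (b - μ) - (a - μ) = b - a := by omega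
  rwa [this] at hdvd

theorem traj_meet_iff (cells : List Int) (rule : String) (μ lam : Nat) (hlam : 1 ≤ lam)
    (hper : traj cells rule (μ + lam) = traj cells rule μ)
    (hinj : ∀ a b : Nat, a < b → b < μ + lam → traj cells rule a ≠ traj cells rule b)
    (m : Nat) (hm : 1 ≤ m) :
    traj cells rule m = traj cells rule (2 * m) ↔ (μ ≤ m ∧ lam ∣ m) := by
  constructor
  · intro h
    have := traj_key cells rule μ lam hlam hper hinj m (2 * m) (by omega) h
    have h2 : 2 * m - m = m := by omega
    rwa [h2] at this
  · rintro ⟨hμm, k, hk⟩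
    have hk' : m = k * lam := by rw [hk, Nat.mul_comm]
    have := traj_period_mul cells rule μ lam hper k m hμm
    rw [show m + k * lam = 2 * m by omega] at this
    exact this.symm

-- ===== B-side loop characterisations =====

theorem floyd_meet_none_inj (cells : List Int) (rule : String) (max_steps : Int)
    (hinj : ∀ a b : Nat, a < b → traj cells rule a ≠ traj cells rule b) :
    ∀ (fuel m : Nat), 1 ≤ m →
      floyd_meet rule max_steps fuel (traj cells rule m) (traj cells rule (2 * m)) (m : Int) =
        none := by
  intro fuel
  induction fuel with
  | zero => intro m _; rfl
  | succ fuel ih =>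
    intro m hm
    rw [floyd_meet, if_neg (hinj m (2 * m) (by omega))]
    by_cases hms : max_steps ≤ (m : Int)
    · rw [if_pos hms]
    · rw [if_neg hms]
      simp only [step_rot_eq]
      rw [← traj_succ, ← traj_succ, ← traj_succ,
        show 2 * m + 1 + 1 = 2 * (m + 1) from by ring,
        show (m : Int) + 1 = ((m + 1 : Nat) : Int) from by push_cast; ring]
      exact ih (m + 1) (by omega)

theorem floyd_meet_none (cells : List Int) (rule : String) (max_steps : Int) (μ lam : Nat)
    (hlam : 1 ≤ lam)
    (hper : traj cells rule (μ + lam) = traj cells rule μ)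
    (hinj : ∀ a b : Nat, a < b → b < μ + lam → traj cells rule a ≠ traj cells rule b)
    (hnone : ∀ k : Nat, 1 ≤ k → (k : Int) ≤ max_steps → ¬(μ ≤ k ∧ lam ∣ k)) :
    ∀ (fuel m : Nat), 1 ≤ m → (m : Int) ≤ max_steps → max_steps - (m : Int) < (fuel : Int) →
      floyd_meet rule max_steps fuel (traj cells rule m) (traj cells rule (2 * m)) (m : Int) =
        none := by
  intro fuel
  induction fuel with
  | zero => intro m _ _ _; rfl
  | succ fuel ih =>
    intro m hm hle hfuel
    have hne : traj cells rule m ≠ traj cells rule (2 * m) := by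
      intro h
      exact hnone m hm hle ((traj_meet_iff cells rule μ lam hlam hper hinj m hm).mp h)
    rw [floyd_meet, if_neg hne]
    by_cases hms : max_steps ≤ (m : Int)
    · rw [if_pos hms]
    · rw [if_neg hms]
      simp only [step_rot_eq]
      rw [← traj_succ, ← traj_succ, ← traj_succ,
        show 2 * m + 1 + 1 = 2 * (m + 1) from by ring,
        show (m : Int) + 1 = ((m + 1 : Nat) : Int) from by push_cast; ring]
      exact ih (m + 1) (by omega) (by push_cast; omega) (by push_cast at hfuel ⊢; omega)

theorem floyd_meet_found (cells : List Int) (rule : String) (max_steps : Int) (μ lam : Nat)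
    (hlam : 1 ≤ lam)
    (hper : traj cells rule (μ + lam) = traj cells rule μ)
    (hinj : ∀ a b : Nat, a < b → b < μ + lam → traj cells rule a ≠ traj cells rule b)
    (m₀ : Nat) (hm₀ : μ ≤ m₀ ∧ lam ∣ m₀) (hm₀pos : 1 ≤ m₀) (hm₀max : (m₀ : Int) ≤ max_steps)
    (hmin : ∀ k : Nat, 1 ≤ k → k < m₀ → ¬(μ ≤ k ∧ lam ∣ k)) :
    ∀ (d m fuel : Nat), 1 ≤ m → m + d = m₀ → d < fuel →
      floyd_meet rule max_steps fuel (traj cells rule m) (traj cells rule (2 * m)) (m : Int) =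
        some (traj cells rule m₀, (m₀ : Int)) := by
  intro d
  induction d with
  | zero =>
    intro m fuel hm hsum hfuel
    rw [show m = m₀ from by omega]
    cases fuel with
    | zero => omega
    | succ fuel =>
      rw [floyd_meet,
        if_pos ((traj_meet_iff cells rule μ lam hlam hper hinj m₀ (by omega)).mpr hm₀)]
  | succ d ih =>
    intro m fuel hm hsum hfuel
    cases fuel with
    | zero => omega
    | succ fuel =>
      have hne : traj cells rule m ≠ traj cells rule (2 * m) := by
        intro h
        exact hmin m hm (by omega) ((traj_meet_iff cells rule μ lam hlam hper hinj m hm).mp h)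
      rw [floyd_meet, if_neg hne, if_neg (show ¬ max_steps ≤ (m : Int) from by push_cast; omega)]
      simp only [step_rot_eq]
      rw [← traj_succ, ← traj_succ, ← traj_succ,
        show 2 * m + 1 + 1 = 2 * (m + 1) from by ring,
        show (m : Int) + 1 = ((m + 1 : Nat) : Int) from by push_cast; ring]
      exact ih (m + 1) fuel (by omega) (by omega) (by omega)

theorem floyd_walk_found (cells : List Int) (rule : String) (μ lam : Nat) (hlam : 1 ≤ lam)
    (hper : traj cells rule (μ + lam) = traj cells rule μ)
    (hinj : ∀ a b : Nat, a < b → b < μ + lam → traj cells rule a ≠ traj cells rule b)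
    (m₀ : Nat) (hm₀pos : 1 ≤ m₀) (hdvd : lam ∣ m₀) :
    ∀ (fuel t : Nat), t ≤ μ → μ - t < fuel →
      floyd_walk rule fuel (traj cells rule t) (traj cells rule (t + m₀)) (t : Int) =
        some (traj cells rule μ, (μ : Int)) := by
  intro fuel
  induction fuel with
  | zero => intro t ht hlt; omega
  | succ fuel ih =>
    intro t ht hlt
    by_cases htμ : t = μ
    · have heq : traj cells rule t = traj cells rule (t + m₀) := by
        obtain ⟨k, hk⟩ := hdvd
        have hk' : m₀ = k * lam := by rw [hk, Nat.mul_comm]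
        rw [htμ]
        have h := traj_period_mul cells rule μ lam hper k μ le_rfl
        rw [← hk'] at h
        exact h.symm
      rw [floyd_walk, if_pos heq, htμ]
    · have hne : traj cells rule t ≠ traj cells rule (t + m₀) := by
        intro h
        have := traj_key cells rule μ lam hlam hper hinj t (t + m₀) (by omega) h
        omega
      rw [floyd_walk, if_neg hne]
      simp only [step_rot_eq]
      rw [← traj_succ, ← traj_succ,
        show t + m₀ + 1 = (t + 1) + m₀ from by ring,
        show (t : Int) + 1 = ((t + 1 : Nat) : Int) from by push_cast; ring]
      exact ih (t + 1) (by omega) (by omega)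

theorem floyd_cycle_found (cells : List Int) (rule : String) (μ lam : Nat) (hlam : 1 ≤ lam)
    (hper : traj cells rule (μ + lam) = traj cells rule μ)
    (hinj : ∀ a b : Nat, a < b → b < μ + lam → traj cells rule a ≠ traj cells rule b) :
    ∀ (fuel j : Nat), 1 ≤ j → j ≤ lam → lam - j < fuel →
      floyd_cycle rule fuel (traj cells rule (μ + j)) (traj cells rule μ) (j : Int) =
        some (lam : Int) := by
  intro fuel
  induction fuel with
  | zero => intro j h1 h2 h3; omega
  | succ fuel ih =>
    intro j h1 h2 h3
    by_cases hjl : j = lam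
    · have heq : traj cells rule (μ + j) = traj cells rule μ := by rw [hjl]; exact hper
      rw [floyd_cycle, if_pos heq, hjl]
    · have hne : traj cells rule (μ + j) ≠ traj cells rule μ := by
        intro h
        obtain ⟨-, hdvd⟩ := traj_key cells rule μ lam hlam hper hinj μ (μ + j) (by omega) h.symm
        rw [show μ + j - μ = j from by omega] at hdvd
        have := Nat.le_of_dvd (by omega) hdvd
        omega
      rw [floyd_cycle, if_neg hne]
      simp only [step_rot_eq]
      rw [← traj_succ,
        show μ + j + 1 = μ + (j + 1) from by ring,
        show (j : Int) + 1 = ((j + 1 : Nat) : Int) from by push_cast; ring]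
      exact ih (j + 1) (by omega) (by omega) (by omega)

-- ===== VERDICT (by name: the statement is the Claim_ definition above) =====
theorem find_orbit_spec : Claim_equal_find_orbit := by
  unfold Claim_equal_find_orbit
  intro cells rule max_steps hdom hpre
  unfold Spec_find_orbit
  by_cases hms : max_steps < 1
  · -- at most one loop iteration on A's side, and no repeat is possible in it
    rw [find_orbit_alt, if_pos hms, find_orbit]
    have h01 : (max_steps + 1).toNat = 0 ∨ (max_steps + 1).toNat = 1 := by omega
    rcases h01 with h | h <;> rw [h]
    · rfl
    · rw [orbit_loop]
      simp [PySem.Dict.get?_empty, orbit_loop]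
  · by_cases hrep : ∃ b : Nat, ∃ a : Nat, a < b ∧ traj cells rule a = traj cells rule b
    · obtain ⟨μ, hμlt, hμeq⟩ := Nat.find_spec hrep
      set T₀ := Nat.find hrep with hT₀
      have hinj : ∀ a b : Nat, a < b → b < T₀ → traj cells rule a ≠ traj cells rule b := by
        intro a b hab hb h
        exact Nat.find_min hrep hb ⟨a, hab, h⟩
      set lam := T₀ - μ with hlamdef
      have hlam : 1 ≤ lam := by omega
      have hμT : μ + lam = T₀ := by omega
      have hper : traj cells rule (μ + lam) = traj cells rule μ := by rw [hμT]; exact hμeq.symm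
      have hinj' : ∀ a b : Nat, a < b → b < μ + lam → traj cells rule a ≠ traj cells rule b := by
        intro a b hab hb
        exact hinj a b hab (by omega)
      -- the least m ≥ 1 with μ ≤ m and lam ∣ m (Floyd's meeting step count)
      have hdm := Nat.div_add_mod μ lam
      have hml : μ % lam < lam := Nat.mod_lt _ (by omega)
      have hmul : lam * (μ / lam + 1) = lam * (μ / lam) + lam := by ring
      have hex : ∃ k : Nat, 1 ≤ k ∧ μ ≤ k ∧ lam ∣ k :=
        ⟨lam * (μ / lam + 1), by omega, by omega, dvd_mul_right _ _⟩
      obtain ⟨hm₀pos, hm₀μ, hm₀dvd⟩ := Nat.find_spec hex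
      set m₀ := Nat.find hex with hm₀def
      have hm₀min : ∀ k : Nat, 1 ≤ k → k < m₀ → ¬(μ ≤ k ∧ lam ∣ k) := by
        rintro k h1 h2 ⟨ha, hb⟩
        exact Nat.find_min hex h2 ⟨h1, ha, hb⟩
      have hm₀le : m₀ ≤ μ + lam := by
        have h1 : m₀ ≤ lam * (μ / lam + 1) :=
          Nat.find_min' hex ⟨by omega, by omega, dvd_mul_right _ _⟩
        have h2 : μ / lam * lam ≤ μ := Nat.div_mul_le_self μ lam
        rw [Nat.mul_comm] at h2
        omega
      have hlamle : lam ≤ m₀ := Nat.le_of_dvd (by omega) hm₀dvd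
      by_cases hreach : (m₀ : Int) ≤ max_steps
      · have hmeet : floyd_meet rule max_steps max_steps.toNat (step_ca cells rule)
            (step_ca (step_ca cells rule) rule) 1 = some (traj cells rule m₀, (m₀ : Int)) := by
          have h := floyd_meet_found cells rule max_steps μ lam hlam hper hinj' m₀
            ⟨hm₀μ, hm₀dvd⟩ hm₀pos hreach hm₀min (m₀ - 1) 1 max_steps.toNat (le_refl 1)
            (by omega) (by omega)
          rw [show traj cells rule 1 = step_ca cells rule from rfl,
            show traj cells rule (2 * 1) = step_ca (step_ca cells rule) rule from rfl,
            Nat.cast_one] at h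
          exact h
        have hwalk : floyd_walk rule (max_steps.toNat + 1) cells (traj cells rule m₀) 0 =
            some (traj cells rule μ, (μ : Int)) := by
          have h := floyd_walk_found cells rule μ lam hlam hper hinj' m₀ hm₀pos hm₀dvd
            (max_steps.toNat + 1) 0 (by omega) (by omega)
          rw [Nat.zero_add, show traj cells rule 0 = cells from rfl, Nat.cast_zero] at h
          exact h
        have hcycle : floyd_cycle rule max_steps.toNat (step_ca (traj cells rule μ) rule)
            (traj cells rule μ) 1 = some (lam : Int) := by
          have h := floyd_cycle_found cells rule μ lam hlam hper hinj' max_steps.toNat 1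
            (le_refl 1) hlam (by omega)
          rw [traj_succ, Nat.cast_one] at h
          exact h
        have hB : find_orbit_alt cells rule max_steps =
            (if (μ : Int) + (lam : Int) ≤ max_steps then (some (μ : Int), some (lam : Int))
             else (none, none)) := by
          rw [find_orbit_alt, if_neg (by omega)]
          simp only [step_rot_eq, hmeet, hwalk, hcycle]
        rw [hB]
        by_cases hTmax : (T₀ : Int) ≤ max_steps
        · have hA := orbit_loop_dup cells rule μ T₀ (by omega) hμeq hinj
            (max_steps + 1).toNat 0 (by omega) (by omega)
          rw [show seenUpto cells rule 0 = PySem.Dict.empty from rfl,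
            show traj cells rule 0 = cells from rfl, Nat.cast_zero] at hA
          rw [find_orbit, hA, if_pos (by omega)]
          rw [show (T₀ : Int) - (μ : Int) = (lam : Int) from by omega]
        · have hA := orbit_loop_no_dup cells rule (max_steps + 1).toNat 0
            (fun a b hab hb => hinj a b hab (by omega))
          rw [show seenUpto cells rule 0 = PySem.Dict.empty from rfl,
            show traj cells rule 0 = cells from rfl, Nat.cast_zero] at hA
          rw [find_orbit, hA, if_neg (by omega)]
      · have hTmax : ¬ (T₀ : Int) ≤ max_steps := by
          intro h
          exact hreach (by omega)
        have hnone : ∀ k : Nat, 1 ≤ k → (k : Int) ≤ max_steps → ¬(μ ≤ k ∧ lam ∣ k) := by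
          rintro k h1 h2 ⟨ha, hb⟩
          have : m₀ ≤ k := Nat.find_min' hex ⟨h1, ha, hb⟩
          omega
        have hmeet : floyd_meet rule max_steps max_steps.toNat (step_ca cells rule)
            (step_ca (step_ca cells rule) rule) 1 = none := by
          have h := floyd_meet_none cells rule max_steps μ lam hlam hper hinj' hnone
            max_steps.toNat 1 (le_refl 1) (by omega) (by omega)
          rw [show traj cells rule 1 = step_ca cells rule from rfl,
            show traj cells rule (2 * 1) = step_ca (step_ca cells rule) rule from rfl,
            Nat.cast_one] at h
          exact h
        have hA := orbit_loop_no_dup cells rule (max_steps + 1).toNat 0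
          (fun a b hab hb => hinj a b hab (by omega))
        rw [show seenUpto cells rule 0 = PySem.Dict.empty from rfl,
          show traj cells rule 0 = cells from rfl, Nat.cast_zero] at hA
        rw [find_orbit, hA, find_orbit_alt, if_neg (by omega)]
        simp only [step_rot_eq, hmeet]
    · push_neg at hrep
      have hinj : ∀ a b : Nat, a < b → traj cells rule a ≠ traj cells rule b :=
        fun a b hab => hrep b a hab
      have hA := orbit_loop_no_dup cells rule (max_steps + 1).toNat 0
        (fun a b hab _ => hinj a b hab)
      rw [show seenUpto cells rule 0 = PySem.Dict.empty from rfl,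
        show traj cells rule 0 = cells from rfl, Nat.cast_zero] at hA
      have hmeet : floyd_meet rule max_steps max_steps.toNat (step_ca cells rule)
          (step_ca (step_ca cells rule) rule) 1 = none := by
        have h := floyd_meet_none_inj cells rule max_steps hinj max_steps.toNat 1 (le_refl 1)
        rw [show traj cells rule 1 = step_ca cells rule from rfl,
          show traj cells rule (2 * 1) = step_ca (step_ca cells rule) rule from rfl,
          Nat.cast_one] at h
        exact h
      rw [find_orbit, hA, find_orbit_alt, if_neg (by omega)]
      simp only [step_rot_eq, hmeet]
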